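-- pv_equiv track=rewrite | github.com/pypi-data/pypi-mirror-389 | packages/vortex-nwp/vortex_nwp-2.2.0.tar.gz/vortex_nwp-2.2.0/src/vortex/data/stores.py | _stacked_remainder
-- ===== SOURCE A (Python) =====
-- def _stacked_remainder(remote, stackpath):
--     path_remainder = remote["path"].strip("/").split("/")
--     for a_spath in stackpath.split("/"):
--         if path_remainder and path_remainder[0] == a_spath:
--             del path_remainder[0]
--         else:
--             break
--     return "/".join(path_remainder)
-- ===== SOURCE B (Python) =====
-- def _stacked_remainder(remote, stackpath):
--     segs = remote["path"].strip("/").split("/")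
--     pairs = list(zip(segs, stackpath.split("/")))
--     n = next((i for i, (x, y) in enumerate(pairs) if x != y), len(pairs))
--     return "/".join(segs[n:])
-- ===== Notes on version B (the rewrite author's own statement) =====
-- stated objective: idiomatic
-- what changed: Replaces A's mutate-and-break loop with a zip-the-segment-lists, find-first-mismatch-index, then-slice-and-join decomposition; no list mutation.
-- outside the precondition, e.g. on _stacked_remainder({}, 'a'): A raises KeyError, B raises KeyError
import Mathlib
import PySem

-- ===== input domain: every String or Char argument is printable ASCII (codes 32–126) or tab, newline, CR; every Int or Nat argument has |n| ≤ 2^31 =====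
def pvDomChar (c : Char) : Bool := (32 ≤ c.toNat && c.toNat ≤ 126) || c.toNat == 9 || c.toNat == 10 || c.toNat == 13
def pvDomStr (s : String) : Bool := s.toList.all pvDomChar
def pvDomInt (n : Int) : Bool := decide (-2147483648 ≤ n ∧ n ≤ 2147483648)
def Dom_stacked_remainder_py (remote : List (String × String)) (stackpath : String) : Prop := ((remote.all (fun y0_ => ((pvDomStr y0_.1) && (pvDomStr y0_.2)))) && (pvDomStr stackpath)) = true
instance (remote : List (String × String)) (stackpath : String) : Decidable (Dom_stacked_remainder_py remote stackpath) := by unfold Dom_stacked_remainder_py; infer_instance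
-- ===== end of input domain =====

-- B replaces A's mutate-and-break loop with zip / find-first-mismatch-index / slice+join (idiomatic; same cost).

-- ===== PORT A =====
-- the for-loop with in-place deletion of path_remainder[0] and break, as structural recursion on the same two lists
def pvLoopA : List String → List String → List String
  | rem, [] => rem
  | [], _ :: _ => []
  | x :: xs, a :: rest => if x = a then pvLoopA xs rest else x :: xs

def stacked_remainder_py (remote : List (String × String)) (stackpath : String) : String :=
  -- remote["path"]: first-match dict lookup; Pre_ guarantees the key is present (else Python raises KeyError)
  let path := ((remote.find? (fun p => p.1 == "path")).map Prod.snd).getD ""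
  let path_remainder := (PySem.Str.split? (PySem.Str.stripChars path "/") "/").getD []
  PySem.Str.join "/" (pvLoopA path_remainder (((PySem.Str.split? stackpath "/").getD [])))

-- ===== PORT B =====
def stacked_remainder_py_alt (remote : List (String × String)) (stackpath : String) : String :=
  let segs := (PySem.Str.split? (PySem.Str.stripChars (((remote.find? (fun p => p.1 == "path")).map Prod.snd).getD "") "/") "/").getD []
  let pairs := segs.zip (((PySem.Str.split? stackpath "/").getD []))
  let n := (pairs.findIdx? (fun t => t.1 != t.2)).getD pairs.length
  PySem.Str.join "/" (segs.drop n)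

-- ===== PRECONDITION & SPEC =====
-- Pre_ excludes remotes without a "path" key, on which the Python A raises KeyError (B raises it too).
def Pre_stacked_remainder_py (remote : List (String × String)) (stackpath : String) : Prop :=
  (remote.map Prod.fst).contains "path" = true
instance (remote : List (String × String)) (stackpath : String) : Decidable (Pre_stacked_remainder_py remote stackpath) := by unfold Pre_stacked_remainder_py; infer_instance
def pvWitness_stacked_remainder_py : (List (String × String)) × String := ([("path", "a/b/c")], "a/b")

def Spec_stacked_remainder_py (remote : List (String × String)) (stackpath : String) (out : String) : Prop := out = stacked_remainder_py_alt remote stackpath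
instance (remote : List (String × String)) (stackpath : String) (out : String) : Decidable (Spec_stacked_remainder_py remote stackpath out) := by unfold Spec_stacked_remainder_py; infer_instance

-- ===== CLAIM (what is proved, stated in full; the proofs are below) =====
def Claim_equal_stacked_remainder_py : Prop := ∀ (remote : List (String × String)) (stackpath : String), Dom_stacked_remainder_py remote stackpath → Pre_stacked_remainder_py remote stackpath → Spec_stacked_remainder_py remote stackpath (stacked_remainder_py remote stackpath)

-- ===== LEMMAS AND PROOFS =====
theorem pvLoopA_eq_drop (xs ys : List String) :
    pvLoopA xs ys = xs.drop ((((xs.zip ys).findIdx? (fun t => t.1 != t.2)).getD (xs.zip ys).length)) := by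
  induction xs generalizing ys with
  | nil => cases ys <;> simp [pvLoopA]
  | cons x xs ih =>
    cases ys with
    | nil => simp [pvLoopA]
    | cons y ys =>
      by_cases h : x = y
      · rw [pvLoopA, if_pos h, ih]
        simp only [List.zip_cons_cons, List.findIdx?_cons, h, bne_self_eq_false, Bool.false_eq_true, if_false, List.length_cons]
        cases hf : (xs.zip ys).findIdx? (fun t => t.1 != t.2) <;> simp [hf]
      · simp [pvLoopA, h, List.findIdx?_cons]

-- ===== VERDICT (by name: the statement is the Claim_ definition above) =====
theorem stacked_remainder_py_spec : Claim_equal_stacked_remainder_py := by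
  intro remote stackpath _ _
  unfold Spec_stacked_remainder_py stacked_remainder_py stacked_remainder_py_alt
  simp only [pvLoopA_eq_drop]
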